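-- pv_equiv track=rewrite | github.com/GrabBootcamp-Datakat/Datakat-AI-Server | app/services/clustering.py | _generate_template_from_cluster
-- ===== SOURCE A (Python) =====
-- from typing import List
--
-- def _generate_template_from_cluster(logs: List[str]) -> str:
--     """Generate a template from a cluster of logs using a faster algorithm"""
--     if not logs:
--         return ""
--
--     if len(logs) == 1:
--         return logs[0]  # No need to process for a single log
--
--     # Convert logs to 2D array for faster processing
--     token_arrays = [log.split() for log in logs]
--     max_length = max(len(tokens) for tokens in token_arrays)
--
--     # Create a template array
--     template_tokens = []
--
--     # Find common tokens
--     for i in range(max_length):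
--         tokens_at_position = [tokens[i] if i < len(tokens) else None for tokens in token_arrays]
--         unique_tokens = set(t for t in tokens_at_position if t is not None)
--
--         if len(unique_tokens) == 1:
--             template_tokens.append(next(iter(unique_tokens)))
--         else:
--             template_tokens.append("<*>")
--
--     # Now, let's check and merge consecutive <*> tokens into one
--     merged_template_tokens = []
--     previous_token = None
--
--     for token in template_tokens:
--         if token == "<*>":
--             if previous_token == "<*>":
--                 continue
--         merged_template_tokens.append(token)
--         previous_token = token
--
--     return ' '.join(merged_template_tokens)
-- ===== SOURCE B (Python) =====
-- from typing import List
--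
-- def _generate_template_from_cluster(logs: List[str]) -> str:
--     """Row-wise fold: one pass over the logs maintaining per-position slots."""
--     if not logs:
--         return ""
--     if len(logs) == 1:
--         return logs[0]
--
--     slots = []        # first token seen at each position
--     varied = set()    # positions where some log disagrees with the stored token
--     for log in logs:
--         for i, t in enumerate(log.split()):
--             if i == len(slots):
--                 slots.append(t)
--             elif t != slots[i]:
--                 varied.add(i)
--
--     out = []
--     prev = None
--     for i, tok in enumerate(slots):
--         t = "<*>" if i in varied else tok
--         if t == "<*>" and prev == "<*>":
--             continue
--         out.append(t)
--         prev = t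
--     return ' '.join(out)
-- ===== Notes on version B (the rewrite author's own statement) =====
-- stated objective: alternative
-- what changed: Replaces A's column-wise scan (building each position's token list and a set per column) by a single row-wise fold that maintains a slots array of first-seen tokens plus a set of varied positions, emitting and merging <*> in one final pass.
import Mathlib
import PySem

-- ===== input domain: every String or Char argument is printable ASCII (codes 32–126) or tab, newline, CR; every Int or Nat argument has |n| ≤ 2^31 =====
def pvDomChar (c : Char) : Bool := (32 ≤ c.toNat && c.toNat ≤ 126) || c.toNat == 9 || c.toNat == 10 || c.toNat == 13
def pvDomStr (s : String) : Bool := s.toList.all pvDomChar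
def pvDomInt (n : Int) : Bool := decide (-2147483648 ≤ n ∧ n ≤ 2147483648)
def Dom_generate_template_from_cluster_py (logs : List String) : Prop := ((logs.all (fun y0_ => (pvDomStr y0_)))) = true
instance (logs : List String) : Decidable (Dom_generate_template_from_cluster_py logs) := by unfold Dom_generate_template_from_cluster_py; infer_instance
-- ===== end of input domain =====

-- B replaces A's column-wise scan by a single row-wise fold over the logs
-- (slots of first-seen tokens + a set of varied positions); objective: alternative.

-- ===== PORT A =====
def generate_template_from_cluster_py (logs : List String) : String :=
  match logs with
  | [] => ""
  | [l] => l
  | _ :: _ :: _ =>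
    let token_arrays := logs.map PySem.Str.split₀
    let max_length := (PySem.List.max? (token_arrays.map (fun t => t.length)) (fun x => x)).getD 0
    -- token_arrays is nonempty here, so Python's max never raises; getD 0 is unreachable
    let template_tokens := (List.range max_length).map (fun i =>
      let tokens_at_position := token_arrays.map (fun tokens => tokens[i]?)
      let unique_tokens := PySem.Set.ofList (tokens_at_position.filterMap id)
      if PySem.Set.len unique_tokens = 1 then unique_tokens.headD "" else "<*>")
    let merged := (template_tokens.foldl
      (fun (st : List String × Option String) token =>
        if token == "<*>" && st.2 == some "<*>" then st
        else (st.1 ++ [token], some token)) ([], none)).1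
    PySem.Str.join " " merged

-- ===== PORT B =====
-- inner loop of Source B over one log's tokens (i ≤ slots.length is an invariant;
-- slots.getD i "" is Python's slots[i], in range whenever that branch is reached)
def pvProcRow (slots : List String) (varied : PySem.Set Nat) (i : Nat) :
    List String → List String × PySem.Set Nat
  | [] => (slots, varied)
  | t :: rest =>
    if i = slots.length then pvProcRow (slots ++ [t]) varied (i + 1) rest
    else if t ≠ slots.getD i "" then pvProcRow slots (PySem.Set.add varied i) (i + 1) rest
    else pvProcRow slots varied (i + 1) rest

-- final loop of Source B: choose "<*>"/token per slot and merge consecutive "<*>"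
def pvEmit (varied : PySem.Set Nat) (i : Nat) (prev : Option String) :
    List String → List String
  | [] => []
  | tok :: rest =>
    let t := if PySem.Set.contains varied i then "<*>" else tok
    if t == "<*>" && prev == some "<*>" then pvEmit varied (i + 1) prev rest
    else t :: pvEmit varied (i + 1) (some t) rest

def generate_template_from_cluster_py_alt (logs : List String) : String :=
  match logs with
  | [] => ""
  | [l] => l
  | _ :: _ :: _ =>
    let st := logs.foldl
      (fun (st : List String × PySem.Set Nat) log =>
        pvProcRow st.1 st.2 0 (PySem.Str.split₀ log)) ([], PySem.Set.empty)
    PySem.Str.join " " (pvEmit st.2 0 none st.1)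

-- ===== PRECONDITION & SPEC =====
def Spec_generate_template_from_cluster_py (logs : List String) (out : String) : Prop := out = generate_template_from_cluster_py_alt logs
instance (logs : List String) (out : String) : Decidable (Spec_generate_template_from_cluster_py logs out) := by unfold Spec_generate_template_from_cluster_py; infer_instance

-- ===== CLAIM (what is proved, stated in full; the proofs are below) =====
def Claim_equal_generate_template_from_cluster_py : Prop := ∀ (logs : List String), Dom_generate_template_from_cluster_py logs → Spec_generate_template_from_cluster_py logs (generate_template_from_cluster_py logs)

-- ===== LEMMAS AND PROOFS =====

-- final slots array of B's fold: each row appends the positions it is first to reach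
def pvF (slots : List String) (tas : List (List String)) : List String :=
  tas.foldl (fun s r => s ++ r.drop s.length) slots

-- the column token both programs compute at position i
def pvCol (tas : List (List String)) (i : Nat) : String :=
  match tas.filterMap (fun r => r[i]?) with
  | [] => "<*>"
  | t :: rest => if rest.all (fun x => x = t) then t else "<*>"

-- recursive form of the merge-consecutive-"<*>" loop
def pvMerge (prev : Option String) : List String → List String
  | [] => []
  | t :: rest => if t == "<*>" && prev == some "<*>" then pvMerge prev rest
                 else t :: pvMerge (some t) rest

-- ---- A-side lemmas ----

theorem pv_prefix_foldl_add (l : List String) : ∀ (s : PySem.Set String),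
    s <+: l.foldl PySem.Set.add s := by
  induction l with
  | nil => intro s; simp
  | cons x l ih =>
    intro s
    refine List.IsPrefix.trans ?_ (ih (PySem.Set.add s x))
    simp only [PySem.Set.add]
    split <;> simp

theorem pv_ofList_all (rest : List String) (t : String) (h : ∀ x ∈ rest, x = t) :
    rest.foldl PySem.Set.add [t] = [t] := by
  induction rest with
  | nil => rfl
  | cons x r ih =>
    have hx := h x (by simp)
    subst hx
    simp only [List.foldl_cons]
    have hadd : PySem.Set.add [x] x = [x] := by simp [PySem.Set.add]
    rw [hadd]
    exact ih (fun y hy => h y (by simp [hy]))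

theorem pvA_col (l : List String) :
    (if PySem.Set.len (PySem.Set.ofList l) = 1 then (PySem.Set.ofList l).headD "" else "<*>")
      = match l with
        | [] => "<*>"
        | t :: rest => if rest.all (fun x => x = t) then t else "<*>" := by
  cases l with
  | nil => rfl
  | cons t rest =>
    have hof : PySem.Set.ofList (t :: rest) = rest.foldl PySem.Set.add [t] := by
      rw [PySem.Set.ofList_eq_foldl]
      rfl
    by_cases h : ∀ x ∈ rest, x = t
    · have h1 : PySem.Set.ofList (t :: rest) = [t] := by
        rw [hof]; exact pv_ofList_all rest t h
      have hall : rest.all (fun x => decide (x = t)) = true := by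
        simp only [List.all_eq_true, decide_eq_true_eq]; exact h
      simp [h1, PySem.Set.len, hall]
    · push Not at h
      obtain ⟨x, hx, hxt⟩ := h
      have hpre : [t] <+: rest.foldl PySem.Set.add [t] := pv_prefix_foldl_add rest [t]
      have hxmem : x ∈ rest.foldl PySem.Set.add [t] := by
        rw [← hof, PySem.Set.mem_ofList]; simp [hx]
      obtain ⟨u, hu⟩ := hpre
      have hune : u ≠ [] := by
        intro hnil
        rw [hnil, List.append_nil] at hu
        rw [← hu] at hxmem
        simp at hxmem
        exact hxt hxmem
      have hlen : ¬ (PySem.Set.ofList (t :: rest)).length = 1 := by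
        rw [hof, ← hu]
        have : 0 < u.length := List.length_pos_iff.mpr hune
        simp only [List.length_append, List.length_cons, List.length_nil]
        omega
      have hall : rest.all (fun x => decide (x = t)) = false := by
        simp only [List.all_eq_false]
        exact ⟨x, hx, by simp [hxt]⟩
      simp [hlen, hall]

theorem pvF_nil (slots : List String) : pvF slots [] = slots := rfl

theorem pvF_cons (slots : List String) (r : List String) (tas : List (List String)) :
    pvF slots (r :: tas) = pvF (slots ++ r.drop slots.length) tas := rfl

theorem pv_append_drop_length (slots r : List String) :
    (slots ++ r.drop slots.length).length = max slots.length r.length := by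
  simp [List.length_drop]
  omega

theorem pv_F_length (tas : List (List String)) : ∀ (slots : List String),
    (pvF slots tas).length = tas.foldl (fun m r => max m r.length) slots.length := by
  induction tas with
  | nil => intro slots; rfl
  | cons r rest ih =>
    intro slots
    rw [pvF_cons, ih, List.foldl_cons, pv_append_drop_length]

-- ---- B-side lemmas ----

theorem pvProcRow_fst (row : List String) : ∀ (slots : List String) (varied : PySem.Set Nat)
    (i : Nat), i ≤ slots.length →
    (pvProcRow slots varied i row).1 = slots ++ row.drop (slots.length - i) := by
  induction row with
  | nil => intro slots varied i _; simp [pvProcRow]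
  | cons t rest ih =>
    intro slots varied i hi
    by_cases h : i = slots.length
    · rw [pvProcRow, if_pos h]
      rw [ih (slots ++ [t]) varied (i + 1) (by simp; omega)]
      have h1 : slots.length - i = 0 := by omega
      simp [h1]
    · have hlt : i < slots.length := by omega
      have hsub : slots.length - i = (slots.length - (i + 1)) + 1 := by omega
      rw [pvProcRow, if_neg h]
      by_cases hne : t ≠ slots.getD i ""
      · rw [if_pos hne, ih slots (PySem.Set.add varied i) (i + 1) (by omega), hsub,
          List.drop_succ_cons]
      · rw [if_neg hne, ih slots varied (i + 1) (by omega), hsub, List.drop_succ_cons]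

theorem pvProcRow_snd (row : List String) : ∀ (slots : List String) (varied : PySem.Set Nat)
    (i : Nat) (j : Nat), i ≤ slots.length →
    (j ∈ (pvProcRow slots varied i row).2 ↔
      j ∈ varied ∨ (i ≤ j ∧ j < slots.length ∧ j - i < row.length ∧
        row.getD (j - i) "" ≠ slots.getD j "")) := by
  induction row with
  | nil =>
    intro slots varied i j _
    simp [pvProcRow]
  | cons t rest ih =>
    intro slots varied i j hi
    by_cases h : i = slots.length
    · rw [pvProcRow, if_pos h]
      rw [ih (slots ++ [t]) varied (i + 1) j (by simp; omega)]
      constructor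
      · rintro (hv | ⟨h1, hlt, _, _⟩)
        · exact Or.inl hv
        · simp at hlt; omega
      · rintro (hv | ⟨h1, hlt, _, _⟩)
        · exact Or.inl hv
        · omega
    · have hlt : i < slots.length := by omega
      rw [pvProcRow, if_neg h]
      by_cases hne : t ≠ slots.getD i ""
      · rw [if_pos hne, ih slots (PySem.Set.add varied i) (i + 1) j (by omega)]
        rw [PySem.Set.mem_add]
        constructor
        · rintro ((hv | hji) | ⟨h1, h2, h3, h4⟩)
          · exact Or.inl hv
          · subst hji
            refine Or.inr ⟨le_refl _, hlt, by simp, ?_⟩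
            simpa using hne
          · have hj : j - i = (j - (i + 1)) + 1 := by omega
            refine Or.inr ⟨by omega, h2, by simp; omega, ?_⟩
            rw [hj, List.getD_cons_succ]
            exact h4
        · rintro (hv | ⟨h1, h2, h3, h4⟩)
          · exact Or.inl (Or.inl hv)
          · by_cases hji : j = i
            · exact Or.inl (Or.inr hji)
            · have hj : j - i = (j - (i + 1)) + 1 := by omega
              rw [hj, List.getD_cons_succ] at h4
              refine Or.inr ⟨by omega, h2, by simp at h3 ⊢; omega, h4⟩
      · rw [if_neg hne, ih slots varied (i + 1) j (by omega)]
        push Not at hne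
        constructor
        · rintro (hv | ⟨h1, h2, h3, h4⟩)
          · exact Or.inl hv
          · have hj : j - i = (j - (i + 1)) + 1 := by omega
            refine Or.inr ⟨by omega, h2, by simp; omega, ?_⟩
            rw [hj, List.getD_cons_succ]
            exact h4
        · rintro (hv | ⟨h1, h2, h3, h4⟩)
          · exact Or.inl hv
          · by_cases hji : j = i
            · subst hji
              simp at h4
              exact absurd hne h4
            · have hj : j - i = (j - (i + 1)) + 1 := by omega
              rw [hj, List.getD_cons_succ] at h4
              refine Or.inr ⟨by omega, h2, by simp at h3 ⊢; omega, h4⟩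

theorem pv_prefix_F (tas : List (List String)) : ∀ (slots : List String),
    slots <+: pvF slots tas := by
  induction tas with
  | nil => intro slots; simp [pvF_nil]
  | cons r rest ih =>
    intro slots
    rw [pvF_cons]
    exact List.IsPrefix.trans (List.prefix_append _ _) (ih _)

theorem pv_getD_prefix {s L : List String} (h : s <+: L) {j : Nat} (hj : j < s.length)
    (d : String) : L.getD j d = s.getD j d := by
  obtain ⟨u, rfl⟩ := h
  simp [List.getD_eq_getElem?_getD, List.getElem?_append_left hj]

theorem pv_slots'_getElem (slots r : List String) {j : Nat} (h1 : slots.length ≤ j)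
    (_h2 : j < r.length) : (slots ++ r.drop slots.length)[j]? = r[j]? := by
  rw [List.getElem?_append_right h1, List.getElem?_drop]
  congr 1
  omega

theorem pv_fold_fst (tas : List (List String)) : ∀ (slots : List String) (varied : PySem.Set Nat),
    (tas.foldl (fun (st : List String × PySem.Set Nat) r => pvProcRow st.1 st.2 0 r)
      (slots, varied)).1 = pvF slots tas := by
  induction tas with
  | nil => intro slots varied; rfl
  | cons r rest ih =>
    intro slots varied
    rw [List.foldl_cons,
      show pvProcRow slots varied 0 r
        = ((pvProcRow slots varied 0 r).1, (pvProcRow slots varied 0 r).2) from rfl,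
      ih, pvF_cons, pvProcRow_fst r slots varied 0 (Nat.zero_le _), Nat.sub_zero]

theorem pv_fold_snd (tas : List (List String)) : ∀ (slots : List String) (varied : PySem.Set Nat)
    (j : Nat),
    (j ∈ (tas.foldl (fun (st : List String × PySem.Set Nat) r => pvProcRow st.1 st.2 0 r)
        (slots, varied)).2 ↔
      j ∈ varied ∨ ∃ r ∈ tas, j < r.length ∧ r.getD j "" ≠ (pvF slots tas).getD j "") := by
  induction tas with
  | nil =>
    intro slots varied j
    simp [pvF_nil]
  | cons r rest ih =>
    intro slots varied j
    rw [List.foldl_cons,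
      show pvProcRow slots varied 0 r
        = ((pvProcRow slots varied 0 r).1, (pvProcRow slots varied 0 r).2) from rfl,
      ih, pvProcRow_snd r slots varied 0 j (Nat.zero_le _),
      pvProcRow_fst r slots varied 0 (Nat.zero_le _), Nat.sub_zero, pvF_cons,
      List.exists_mem_cons_iff]
    have hpre : (slots ++ r.drop slots.length) <+: pvF (slots ++ r.drop slots.length) rest :=
      pv_prefix_F rest _
    have hf1 : ∀ (hj : j < slots.length),
        (pvF (slots ++ r.drop slots.length) rest).getD j "" = slots.getD j "" := by
      intro hj
      rw [pv_getD_prefix hpre (by rw [pv_append_drop_length]; omega) ""]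
      simp [List.getD_eq_getElem?_getD, List.getElem?_append_left hj]
    have hf2 : ∀ (hj1 : slots.length ≤ j) (hj2 : j < r.length),
        (pvF (slots ++ r.drop slots.length) rest).getD j "" = r.getD j "" := by
      intro hj1 hj2
      rw [pv_getD_prefix hpre (by rw [pv_append_drop_length]; omega) ""]
      simp [List.getD_eq_getElem?_getD, pv_slots'_getElem slots r hj1 hj2]
    constructor
    · rintro ((hv | ⟨_, hjs, hjr, hne⟩) | ⟨r', hr', hjr', hne'⟩)
      · exact Or.inl hv
      · exact Or.inr (Or.inl ⟨hjr, by rw [hf1 hjs]; exact hne⟩)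
      · exact Or.inr (Or.inr ⟨r', hr', hjr', hne'⟩)
    · rintro (hv | (⟨hjr, hne⟩ | ⟨r', hr', hjr', hne'⟩))
      · exact Or.inl (Or.inl hv)
      · by_cases hjs : j < slots.length
        · exact Or.inl (Or.inr ⟨Nat.zero_le _, hjs, hjr, by rw [← hf1 hjs]; exact hne⟩)
        · exact absurd (hf2 (by omega) hjr).symm hne
      · exact Or.inr ⟨r', hr', hjr', hne'⟩

theorem pv_F_getElem? (tas : List (List String)) : ∀ (slots : List String) (j : Nat),
    (pvF slots tas)[j]? = if j < slots.length then slots[j]?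
      else (tas.filterMap (fun r => r[j]?)).head? := by
  induction tas with
  | nil =>
    intro slots j
    rw [pvF_nil]
    split_ifs with h
    · rfl
    · simp [List.getElem?_eq_none (Nat.le_of_not_lt h)]
  | cons r rest ih =>
    intro slots j
    rw [pvF_cons, ih]
    by_cases h1 : j < slots.length
    · rw [if_pos (show j < (slots ++ r.drop slots.length).length by
          rw [pv_append_drop_length]; omega), if_pos h1]
      exact List.getElem?_append_left h1
    · rw [if_neg h1]
      by_cases h2 : j < r.length
      · rw [if_pos (show j < (slots ++ r.drop slots.length).length by
            rw [pv_append_drop_length]; omega)]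
        rw [pv_slots'_getElem slots r (by omega) h2]
        have hx : r[j]? = some (r[j]'h2) := List.getElem?_eq_getElem h2
        simp [hx]
      · have hx : r[j]? = none := List.getElem?_eq_none (by omega)
        rw [if_neg (show ¬ j < (slots ++ r.drop slots.length).length by
            rw [pv_append_drop_length]; omega)]
        rw [List.filterMap_cons, hx]

-- ---- assembling the two template lists ----

theorem pv_pointwise (tas : List (List String)) (varied : PySem.Set Nat) (j : Nat)
    (hj : j < (pvF [] tas).length)
    (hv : ∀ k, k ∈ varied ↔ ∃ r ∈ tas, k < r.length ∧ r.getD k "" ≠ (pvF [] tas).getD k "") :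
    (if PySem.Set.contains varied j then "<*>" else (pvF [] tas).getD j "") = pvCol tas j := by
  set d := (pvF [] tas).getD j "" with hd
  have hget : (pvF [] tas)[j]? = (tas.filterMap (fun r => r[j]?)).head? := by
    rw [pv_F_getElem? tas [] j]
    simp
  have hjval : (pvF [] tas)[j]? = some d := by
    rw [List.getElem?_eq_getElem hj, hd, List.getD_eq_getElem (pvF [] tas) "" hj]
  have hhead : (tas.filterMap (fun r => r[j]?)).head? = some d := by rw [← hget, hjval]
  obtain ⟨tl, hp⟩ : ∃ tl, tas.filterMap (fun r => r[j]?) = d :: tl := by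
    cases hpres : tas.filterMap (fun r => r[j]?) with
    | nil => rw [hpres] at hhead; simp at hhead
    | cons a tl =>
      rw [hpres] at hhead
      simp at hhead
      exact ⟨tl, by rw [hhead]⟩
  have hmem : ∀ x ∈ tl, ∃ r ∈ tas, j < r.length ∧ r.getD j "" = x := by
    intro x hx
    have hxm : x ∈ tas.filterMap (fun r => r[j]?) := by
      rw [hp]; exact List.mem_cons_of_mem _ hx
    obtain ⟨r, hr, hrx⟩ := List.mem_filterMap.mp hxm
    obtain ⟨hlt, hval⟩ := List.getElem?_eq_some_iff.mp hrx
    exact ⟨r, hr, hlt, by rw [List.getD_eq_getElem r "" hlt]; exact hval⟩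
  have hmem' : ∀ (r : List String), r ∈ tas → j < r.length → r.getD j "" ∈ d :: tl := by
    intro r hr hlt
    rw [← hp]
    exact List.mem_filterMap.mpr ⟨r, hr, by
      rw [List.getElem?_eq_getElem hlt, List.getD_eq_getElem r "" hlt]⟩
  unfold pvCol
  rw [hp]
  show (if PySem.Set.contains varied j then "<*>" else d)
    = if (tl.all fun x => decide (x = d)) = true then d else "<*>"
  by_cases hc : PySem.Set.contains varied j = true
  · rw [if_pos hc]
    obtain ⟨r, hr, hjr, hne⟩ := (hv j).mp ((PySem.Set.contains_iff varied j).mp hc)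
    have hxtl : r.getD j "" ∈ tl := by
      rcases List.mem_cons.mp (hmem' r hr hjr) with h | h
      · exact absurd h hne
      · exact h
    rw [if_neg ?_]
    simp only [List.all_eq_true, decide_eq_true_eq]
    push Not
    exact ⟨r.getD j "", hxtl, hne⟩
  · rw [if_neg hc]
    have hnv : ∀ x ∈ tl, x = d := by
      intro x hx
      by_contra hxd
      obtain ⟨r, hr, hjr, hrd⟩ := hmem x hx
      have : j ∈ varied := (hv j).mpr ⟨r, hr, hjr, by rw [hrd]; exact hxd⟩
      exact hc ((PySem.Set.contains_iff varied j).mpr this)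
    rw [if_pos ?_]
    simp only [List.all_eq_true, decide_eq_true_eq]
    exact hnv

theorem pvEmit_eq_merge (varied : PySem.Set Nat) (l : List String) : ∀ (i : Nat)
    (prev : Option String),
    pvEmit varied i prev l = pvMerge prev
      ((List.range l.length).map (fun k =>
        if PySem.Set.contains varied (i + k) then "<*>" else l.getD k "")) := by
  induction l with
  | nil => intro i prev; rfl
  | cons tok rest ih =>
    intro i prev
    rw [List.length_cons, List.range_succ_eq_map, List.map_cons]
    have hmap : (List.map Nat.succ (List.range rest.length)).map
        (fun k => if PySem.Set.contains varied (i + k) then "<*>" else (tok :: rest).getD k "")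
        = (List.range rest.length).map
          (fun k => if PySem.Set.contains varied ((i + 1) + k) then "<*>" else rest.getD k "") := by
      rw [List.map_map]
      refine List.map_congr_left ?_
      intro k _
      simp only [Function.comp_apply]
      rw [show i + Nat.succ k = (i + 1) + k from by omega,
        show (tok :: rest).getD (Nat.succ k) "" = rest.getD k "" from rfl]
    rw [hmap]
    simp only [Nat.add_zero, List.getD_cons_zero]
    rw [pvEmit, pvMerge]
    by_cases h : ((if PySem.Set.contains varied i then "<*>" else tok) == "<*>"
        && prev == some "<*>") = true
    · rw [if_pos h, if_pos h, ih]
    · rw [if_neg h, if_neg h, ih]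

theorem pvMergeFoldl (ts : List String) : ∀ (acc : List String) (prev : Option String),
    (ts.foldl (fun (st : List String × Option String) token =>
      if token == "<*>" && st.2 == some "<*>" then st
      else (st.1 ++ [token], some token)) (acc, prev)).1 = acc ++ pvMerge prev ts := by
  induction ts with
  | nil => intro acc prev; simp [pvMerge]
  | cons t ts ih =>
    intro acc prev
    rw [List.foldl_cons]
    by_cases h : (t == "<*>" && prev == some "<*>") = true
    · rw [if_pos (by simpa using h), pvMerge, if_pos h, ih]
    · rw [if_neg (by simpa using h), pvMerge, if_neg h, ih]
      simp

theorem pv_main (a b : String) (rest : List String) :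
    generate_template_from_cluster_py (a :: b :: rest)
      = generate_template_from_cluster_py_alt (a :: b :: rest) := by
  have htas : (a :: b :: rest).map PySem.Str.split₀
      = PySem.Str.split₀ a :: (b :: rest).map PySem.Str.split₀ := rfl
  set tas := (a :: b :: rest).map PySem.Str.split₀ with htasdef
  set stF := (a :: b :: rest).foldl
      (fun (st : List String × PySem.Set Nat) log =>
        pvProcRow st.1 st.2 0 (PySem.Str.split₀ log)) ([], PySem.Set.empty) with hstF
  have hfold : stF = tas.foldl
      (fun (st : List String × PySem.Set Nat) r => pvProcRow st.1 st.2 0 r)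
      ([], PySem.Set.empty) := by
    rw [hstF, htasdef, List.foldl_map]
  have hfst : stF.1 = pvF [] tas := by rw [hfold]; exact pv_fold_fst tas [] _
  have hsnd : ∀ k, k ∈ stF.2 ↔
      ∃ r ∈ tas, k < r.length ∧ r.getD k "" ≠ (pvF [] tas).getD k "" := by
    intro k
    rw [hfold, pv_fold_snd tas [] PySem.Set.empty k]
    simp [PySem.Set.empty]
  have hN : (PySem.List.max? (tas.map (fun t => t.length)) (fun x => x)).getD 0
      = (pvF [] tas).length := by
    rw [pv_F_length tas [], htas, List.map_cons, PySem.List.max?_id_cons,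
      Option.getD_some, List.foldl_map, List.foldl_cons]
    simp
  have hAcol : ∀ i : Nat,
      (if PySem.Set.len (PySem.Set.ofList
            ((tas.map (fun tokens => tokens[i]?)).filterMap id)) = 1
        then (PySem.Set.ofList
            ((tas.map (fun tokens => tokens[i]?)).filterMap id)).headD ""
        else "<*>") = pvCol tas i := by
    intro i
    rw [List.filterMap_map]
    have h1 : (id ∘ fun (tokens : List String) => tokens[i]?) = fun r => r[i]? := by
      funext r; rfl
    rw [h1]
    exact (pvA_col (tas.filterMap (fun r => r[i]?))).trans rfl
  simp only [generate_template_from_cluster_py, generate_template_from_cluster_py_alt]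
  rw [← hstF, ← htasdef]
  congr 1
  rw [pvMergeFoldl, List.nil_append, hfst,
    pvEmit_eq_merge stF.2 (pvF [] tas) 0 none]
  congr 1
  rw [List.map_congr_left (fun i _ => hAcol i), hN]
  refine List.map_congr_left ?_
  intro k hk
  rw [List.mem_range] at hk
  rw [Nat.zero_add]
  exact (pv_pointwise tas stF.2 k hk hsnd).symm

-- ===== VERDICT (by name: the statement is the Claim_ definition above) =====
theorem generate_template_from_cluster_py_spec : Claim_equal_generate_template_from_cluster_py := by
  unfold Claim_equal_generate_template_from_cluster_py
  intro logs _
  unfold Spec_generate_template_from_cluster_py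
  match logs with
  | [] => rfl
  | [l] => rfl
  | a :: b :: rest => exact pv_main a b rest
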